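-- pv_equiv track=rewrite | github.com/personalizedrefrigerator/AlmostMake | Includes/shellUtil/runner.py | filterSplitList
-- ===== SOURCE A (Python) =====
-- def filterSplitList(splitString):
--     result = []
--     buff = []
--
--     for part in splitString:
--         part = part.strip()
--         buff.append(part)
--
--         if part == '2':
--             result.extend(buff[:len(buff) - 1])
--             buff = [ '2' ]
--         elif buff == ['2', '>&', '1']:
--             result.append('2>&1')
--             buff = []
--     result.extend(buff)
--
--     return result
-- ===== SOURCE B (Python) =====
-- def filterSplitList(splitString):
--     toks = [p.strip() for p in splitString]
--     result = []
--     i = 0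
--     n = len(toks)
--     while i < n:
--         if toks[i:i + 3] == ['2', '>&', '1']:
--             result.append('2>&1')
--             i += 3
--         else:
--             result.append(toks[i])
--             i += 1
--     return result
-- ===== Notes on version B (the rewrite author's own statement) =====
-- stated objective: simpler
-- what changed: Replaced the buffer-accumulator state machine (append/flush buff[:-1]/reset-on-'2') with a stateless single-pass sliding-window scan over the pre-stripped tokens that merges a '2','>&','1' triple into '2>&1' and otherwise copies the token.
import Mathlib
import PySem

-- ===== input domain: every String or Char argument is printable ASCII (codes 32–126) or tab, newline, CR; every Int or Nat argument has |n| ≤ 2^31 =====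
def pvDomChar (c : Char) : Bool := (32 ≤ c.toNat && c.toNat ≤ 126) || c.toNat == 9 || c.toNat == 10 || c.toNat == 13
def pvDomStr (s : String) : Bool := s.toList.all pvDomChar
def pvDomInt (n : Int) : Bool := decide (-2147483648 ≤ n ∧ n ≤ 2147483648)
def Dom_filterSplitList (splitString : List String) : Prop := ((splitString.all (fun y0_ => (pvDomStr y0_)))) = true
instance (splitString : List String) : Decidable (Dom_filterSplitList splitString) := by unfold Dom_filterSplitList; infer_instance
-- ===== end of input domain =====

-- B replaces A's buffer-accumulator state machine by a stateless sliding-window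
-- scan over the pre-stripped tokens (objective: simpler).

-- ===== PORT A =====
-- one iteration of A's for-loop: state is (result, buff)
def stepA (st : List String × List String) (part : String) : List String × List String :=
  let part := PySem.Str.strip part
  let buff := st.2 ++ [part]
  if part = "2" then
    (st.1 ++ buff.take (buff.length - 1), ["2"])   -- result.extend(buff[:len(buff)-1]); buff = ['2']
  else if buff = ["2", ">&", "1"] then
    (st.1 ++ ["2>&1"], [])                         -- result.append('2>&1'); buff = []
  else
    (st.1, buff)

def filterSplitList (splitString : List String) : List String :=
  let r := splitString.foldl stepA ([], [])
  r.1 ++ r.2                                       -- result.extend(buff)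

-- ===== PORT B =====
-- B's while-loop over index i with a 3-token lookahead, as recursion on the token list
def scanB : List String → List String
  | "2" :: ">&" :: "1" :: rest => "2>&1" :: scanB rest
  | t :: rest => t :: scanB rest
  | [] => []

def filterSplitList_alt (splitString : List String) : List String :=
  scanB (splitString.map PySem.Str.strip)

-- ===== PRECONDITION & SPEC =====
def Spec_filterSplitList (splitString : List String) (out : List String) : Prop := out = filterSplitList_alt splitString
instance (splitString : List String) (out : List String) : Decidable (Spec_filterSplitList splitString out) := by unfold Spec_filterSplitList; infer_instance

-- ===== CLAIM (what is proved, stated in full; the proofs are below) =====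
def Claim_equal_filterSplitList : Prop := ∀ (splitString : List String), Dom_filterSplitList splitString → Spec_filterSplitList splitString (filterSplitList splitString)

-- ===== LEMMAS AND PROOFS =====

-- A's loop over already-stripped tokens (strip pulled out of the step)
def stepA' (st : List String × List String) (t : String) : List String × List String :=
  let buff := st.2 ++ [t]
  if t = "2" then
    (st.1 ++ buff.take (buff.length - 1), ["2"])
  else if buff = ["2", ">&", "1"] then
    (st.1 ++ ["2>&1"], [])
  else
    (st.1, buff)

-- the flattened output of A's loop run from an arbitrary state
def outA (res buff : List String) (ts : List String) : List String :=
  let r := ts.foldl stepA' (res, buff)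
  r.1 ++ r.2

theorem filterSplitList_eq_outA (s : List String) :
    filterSplitList s = outA [] [] (s.map PySem.Str.strip) := by
  unfold filterSplitList outA
  rw [List.foldl_map]
  rfl

theorem step_res (res buff : List String) (t : String) :
    stepA' (res, buff) t = (res ++ (stepA' ([], buff) t).1, (stepA' ([], buff) t).2) := by
  simp only [stepA']
  split_ifs <;> simp

theorem foldl_res (ts : List String) : ∀ res buff,
    ts.foldl stepA' (res, buff)
      = (res ++ (ts.foldl stepA' ([], buff)).1, (ts.foldl stepA' ([], buff)).2) := by
  induction ts with
  | nil => intro res buff; simp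
  | cons t rest ih =>
    intro res buff
    simp only [List.foldl_cons]
    rw [step_res res buff t]
    rw [ih (res ++ (stepA' ([], buff) t).1) ((stepA' ([], buff) t).2)]
    conv_rhs => rw [show stepA' ([], buff) t
        = ((stepA' ([], buff) t).1, (stepA' ([], buff) t).2) from rfl]
    rw [ih ((stepA' ([], buff) t).1) ((stepA' ([], buff) t).2)]
    simp

-- the accumulated result is only ever appended to
theorem outA_res (ts res buff : List String) :
    outA res buff ts = res ++ outA [] buff ts := by
  unfold outA
  rw [foldl_res]
  simp

-- one loop step of A, phrased on outA
theorem outA_cons (buff : List String) (t : String) (rest : List String) :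
    outA [] buff (t :: rest)
      = outA (stepA' ([], buff) t).1 (stepA' ([], buff) t).2 rest := by
  simp only [outA, List.foldl_cons]

-- a buffer that is not a prefix of the pattern sits inertly in front of the output
theorem outA_dead (ts : List String) : ∀ pre, ¬ pre <+: ["2", ">&", "1"] →
    outA [] pre ts = pre ++ outA [] [] ts := by
  induction ts with
  | nil => intro pre _; simp [outA]
  | cons t rest ih =>
    intro pre hpre
    by_cases h2 : t = "2"
    · subst h2
      have l1 : outA [] pre ("2" :: rest) = pre ++ outA [] ["2"] rest := by
        rw [outA_cons]
        simp only [stepA']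
        have htake : (pre ++ ["2"]).take ((pre ++ ["2"]).length - 1) = pre := by simp
        rw [htake, outA_res]
        simp
      have l2 : outA [] [] ("2" :: rest) = outA [] ["2"] rest := by
        rw [outA_cons]; simp [stepA']
      rw [l1, l2]
    · have hne : pre ++ [t] ≠ ["2", ">&", "1"] := fun h => hpre ⟨[t], h⟩
      have hstep : outA [] pre (t :: rest) = outA [] (pre ++ [t]) rest := by
        rw [outA_cons]; simp [stepA', h2, hne]
      have hgrow : ¬ (pre ++ [t]) <+: ["2", ">&", "1"] :=
        fun hp => hpre (List.IsPrefix.trans ⟨[t], rfl⟩ hp)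
      have hd1 : ¬ [t] <+: ["2", ">&", "1"] := by
        intro hp; rcases hp with ⟨s, hs⟩
        injection hs with h _; exact h2 h
      have hstep2 : outA [] [] (t :: rest) = outA [] [t] rest := by
        rw [outA_cons]
        simp [stepA', h2]
      rw [hstep, ih _ hgrow, hstep2, ih _ hd1]
      simp

-- scanB unfolding lemmas for a non-matching head window
theorem scanB_cons_ne (t : String) (l : List String) (h : t ≠ "2") :
    scanB (t :: l) = t :: scanB l := by
  rw [scanB.eq_def]
  split
  · rename_i heq
    injection heq with hh _; exact absurd hh h
  · rename_i heq
    injection heq with hh hrest; rw [hh, hrest]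
  · rename_i heq; exact absurd heq (by simp)

theorem scanB_two_ne (u : String) (l : List String) (h : u ≠ ">&") :
    scanB ("2" :: u :: l) = "2" :: scanB (u :: l) := by
  rw [scanB.eq_def]
  split
  · rename_i heq
    injection heq with _ h2; injection h2 with hh _; exact absurd hh h
  · rename_i heq
    injection heq with hh hrest; rw [hh, hrest]
  · rename_i heq; exact absurd heq (by simp)

theorem scanB_two_amp_ne (v : String) (l : List String) (h : v ≠ "1") :
    scanB ("2" :: ">&" :: v :: l) = "2" :: scanB (">&" :: v :: l) := by
  rw [scanB.eq_def]
  split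
  · rename_i heq
    injection heq with _ h2; injection h2 with _ h3; injection h3 with hh _; exact absurd hh h
  · rename_i heq
    injection heq with hh hrest; rw [hh, hrest]
  · rename_i heq; exact absurd heq (by simp)

-- main lemma: A's loop from the empty state computes B's sliding-window scan
theorem outA_scanB : ∀ ts, outA [] [] ts = scanB ts := by
  intro ts
  induction hn : ts.length using Nat.strong_induction_on generalizing ts with
  | _ n ih =>
  subst hn
  match ts with
  | [] => simp [outA, scanB]
  | t :: rest =>
    by_cases h2 : t = "2"
    · subst h2
      have step1 : outA [] [] ("2" :: rest) = outA [] ["2"] rest := by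
        rw [outA_cons]; simp [stepA']
      match rest with
      | [] => simp [outA, scanB, stepA']
      | u :: rest2 =>
        by_cases hu2 : u = "2"
        · subst hu2
          have l1 : outA [] ["2"] ("2" :: rest2) = "2" :: outA [] ["2"] rest2 := by
            rw [outA_cons]
            simp only [stepA']
            rw [outA_res]
            simp
          have l2 : outA [] ["2"] rest2 = outA [] [] ("2" :: rest2) := by
            rw [outA_cons]; simp [stepA']
          rw [step1, l1, l2, ih ("2" :: rest2).length (by simp) _ rfl,
              scanB_two_ne "2" rest2 (by decide)]
        · by_cases hamp : u = ">&"
          · subst hamp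
            have step2 : outA [] ["2"] (">&" :: rest2) = outA [] ["2", ">&"] rest2 := by
              rw [outA_cons]
              have h1 : (">&" : String) ≠ "2" := by decide
              simp [stepA', h1]
            match rest2 with
            | [] =>
              rw [step1, step2]; simp [outA]; decide
            | v :: rest3 =>
              by_cases hv1 : v = "1"
              · subst hv1
                have l1 : outA [] ["2", ">&"] ("1" :: rest3) = "2>&1" :: outA [] [] rest3 := by
                  rw [outA_cons]
                  have ha : ("1" : String) ≠ "2" := by decide
                  have hb : (["2", ">&"] : List String) ++ ["1"] = ["2", ">&", "1"] := by decide
                  simp only [stepA', if_neg ha, hb, List.nil_append]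
                  rw [outA_res]
                  rfl
                rw [step1, step2, l1, ih rest3.length (by simp; omega) _ rfl]
                rfl
              · by_cases hv2 : v = "2"
                · subst hv2
                  have l1 : outA [] ["2", ">&"] ("2" :: rest3)
                       = "2" :: ">&" :: outA [] ["2"] rest3 := by
                    rw [outA_cons]
                    simp only [stepA']
                    rw [outA_res]
                    simp
                  have l2 : outA [] ["2"] rest3 = outA [] [] ("2" :: rest3) := by
                    rw [outA_cons]; simp [stepA']
                  rw [step1, step2, l1, l2, ih ("2" :: rest3).length (by simp) _ rfl,
                      scanB_two_amp_ne "2" rest3 (by decide),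
                      scanB_cons_ne ">&" ("2" :: rest3) (by decide)]
                · have l1 : outA [] ["2", ">&"] (v :: rest3)
                       = outA [] ["2", ">&", v] rest3 := by
                    rw [outA_cons]
                    simp [stepA', hv1, hv2]
                  have hdead : ¬ ["2", ">&", v] <+: ["2", ">&", "1"] := by
                    intro hp; rcases hp with ⟨s, hs⟩
                    injection hs with _ hs2; injection hs2 with _ hs3
                    injection hs3 with h _; exact hv1 h
                  rw [step1, step2, l1, outA_dead rest3 _ hdead,
                      ih rest3.length (by simp; omega) _ rfl,
                      scanB_two_amp_ne v rest3 hv1,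
                      scanB_cons_ne ">&" (v :: rest3) (by decide),
                      scanB_cons_ne v rest3 hv2]
                  simp
          · have l1 : outA [] ["2"] (u :: rest2) = outA [] ["2", u] rest2 := by
              rw [outA_cons]
              have hne : (["2"] : List String) ++ [u] ≠ ["2", ">&", "1"] := by
                intro h
                apply hamp
                have := congrArg (fun l => l[1]?) h
                simpa using this
              simp [stepA', hu2]
            have hdead : ¬ ["2", u] <+: ["2", ">&", "1"] := by
              intro hp; rcases hp with ⟨s, hs⟩
              injection hs with _ hs2; injection hs2 with h _; exact hamp h
            rw [step1, l1, outA_dead rest2 _ hdead, ih rest2.length (by simp) _ rfl,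
                scanB_two_ne u rest2 hamp, scanB_cons_ne u rest2 hu2]
            simp
    · have hd1 : ¬ [t] <+: ["2", ">&", "1"] := by
        intro hp; rcases hp with ⟨s, hs⟩
        injection hs with h _; exact h2 h
      have hstep : outA [] [] (t :: rest) = outA [] [t] rest := by
        rw [outA_cons]
        simp [stepA', h2]
      rw [hstep, outA_dead rest _ hd1, ih rest.length (by simp) _ rfl,
          scanB_cons_ne t rest h2]
      simp

-- ===== VERDICT (by name: the statement is the Claim_ definition above) =====
theorem filterSplitList_spec : Claim_equal_filterSplitList := by
  intro s _
  unfold Spec_filterSplitList filterSplitList_alt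
  rw [filterSplitList_eq_outA, outA_scanB]
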